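-- pv_equiv track=rewrite | github.com/0x90/wps-scripts | belkin-wpspin.py | wps_pin_checksum
-- ===== SOURCE A (Python) =====
-- def wps_pin_checksum(pin):
--     accum = 0
--     while(pin):
--         accum += 3 * (pin % 10)
--         pin //= 10  # Change to ensure integer division
--         accum += pin % 10
--         pin //= 10  # Change to ensure integer division
--     return (10 - accum % 10) % 10
-- ===== SOURCE B (Python) =====
-- def wps_pin_checksum(pin):
--     accum = 0
--     for i, d in enumerate(reversed(str(pin))):
--         accum += int(d) * (3 if i % 2 == 0 else 1)
--     return (10 - accum % 10) % 10
-- ===== Notes on version B (the rewrite author's own statement) =====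
-- stated objective: alternative
-- what changed: B walks the decimal string of pin least-significant digit first with positional weights of three and one by index parity, instead of A's two-digits-per-iteration arithmetic peeling loop; Pre_ restricts to pin >= 0, where A infinite-loops on negative pins (it never returns there).
import Mathlib
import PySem

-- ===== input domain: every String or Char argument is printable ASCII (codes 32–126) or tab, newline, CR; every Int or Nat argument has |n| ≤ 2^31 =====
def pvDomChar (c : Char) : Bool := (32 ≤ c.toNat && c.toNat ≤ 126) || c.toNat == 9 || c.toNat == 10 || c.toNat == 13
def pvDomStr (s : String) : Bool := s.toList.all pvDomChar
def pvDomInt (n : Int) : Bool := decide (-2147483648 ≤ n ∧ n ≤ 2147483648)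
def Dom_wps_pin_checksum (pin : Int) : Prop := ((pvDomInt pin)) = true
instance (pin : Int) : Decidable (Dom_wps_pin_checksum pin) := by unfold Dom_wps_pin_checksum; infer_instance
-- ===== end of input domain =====

-- B replaces A's two-digits-per-iteration arithmetic peeling with a single pass over the
-- reversed decimal string, weighting digits by index parity (three for even positions, one for odd); Pre_ restricts to pin ≥ 0,
-- where the Python A never returns (its while loop diverges on negative pins).


-- ===== PORT A =====
-- A's 'while pin:' loop; the guard is written '0 < pin' so the recursion terminates:
-- on Pre_ (pin ≥ 0) this is exactly 'pin ≠ 0', and for pin < 0 the Python loop diverges.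
def wpsLoopA (pin accum : Int) : Int :=
  if h : 0 < pin then
    let accum1 := accum + 3 * PySem.Int.mod pin 10
    let pin1 := PySem.Int.floordiv pin 10
    let accum2 := accum1 + PySem.Int.mod pin1 10
    let pin2 := PySem.Int.floordiv pin1 10
    wpsLoopA pin2 accum2
  else accum
termination_by pin.toNat
decreasing_by
  have h1 : PySem.Int.floordiv pin 10 = pin / 10 := PySem.Int.floordiv_eq_ediv_of_pos (by norm_num)
  have h2 : PySem.Int.floordiv (pin / 10) 10 = pin / 10 / 10 := PySem.Int.floordiv_eq_ediv_of_pos (by norm_num)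
  simp only [h1, h2]
  omega

def wps_pin_checksum (pin : Int) : Int :=
  PySem.Int.mod (10 - PySem.Int.mod (wpsLoopA pin 0) 10) 10

-- ===== PORT B =====
def wps_pin_checksum_alt (pin : Int) : Int :=
  let accum := (PySem.List.enumerate ((PySem.Int.toChars pin).reverse) 0).foldl
    (fun accum p =>
      accum + (PySem.Int.ofChars? [p.2]).getD 0 * (if PySem.Int.mod p.1 2 = 0 then 3 else 1)) 0
  PySem.Int.mod (10 - PySem.Int.mod accum 10) 10

-- ===== PRECONDITION & SPEC =====
-- Pre_ excludes pin < 0: there the Python A's while loop never terminates (pin //= 10 is stuck at -1).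
def Pre_wps_pin_checksum (pin : Int) : Prop := 0 ≤ pin
instance (pin : Int) : Decidable (Pre_wps_pin_checksum pin) := by unfold Pre_wps_pin_checksum; infer_instance
def pvWitness_wps_pin_checksum : Int := (12345670)

def Spec_wps_pin_checksum (pin : Int) (out : Int) : Prop := out = wps_pin_checksum_alt pin
instance (pin : Int) (out : Int) : Decidable (Spec_wps_pin_checksum pin out) := by unfold Spec_wps_pin_checksum; infer_instance

-- ===== CLAIM (what is proved, stated in full; the proofs are below) =====
def Claim_equal_wps_pin_checksum : Prop := ∀ (pin : Int), Dom_wps_pin_checksum pin → Pre_wps_pin_checksum pin → Spec_wps_pin_checksum pin (wps_pin_checksum pin)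

-- ===== LEMMAS AND PROOFS =====

-- value of a single digit character, as B's int(d) computes it
def pvVal (c : Char) : Int := (PySem.Int.ofChars? [c]).getD 0

-- alternating-weight digit sum over a least-significant-first digit-char list;
-- the Bool is the parity of the current index (true = weight 3)
def pvAltVal : Bool → List Char → Int
  | _, [] => 0
  | b, c :: t => pvVal c * (if b then 3 else 1) + pvAltVal (!b) t

theorem pvVal_digitChar (d : Nat) (h : d < 10) : pvVal (Nat.digitChar d) = (d : Int) := by
  interval_cases d <;> decide

theorem pvBsum (l : List Char) (s : Int) :
    ((PySem.List.enumerate l s).map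
      (fun p => (PySem.Int.ofChars? [p.2]).getD 0 * (if PySem.Int.mod p.1 2 = 0 then 3 else 1))).sum
      = pvAltVal (decide (PySem.Int.mod s 2 = 0)) l := by
  induction l generalizing s with
  | nil => simp [PySem.List.enumerate_nil, pvAltVal]
  | cons c t ih =>
    rw [PySem.List.enumerate_cons]
    have hs : PySem.Int.mod s 2 = s % 2 := PySem.Int.mod_eq_emod_of_pos (by norm_num)
    have hs1 : PySem.Int.mod (s + 1) 2 = (s + 1) % 2 := PySem.Int.mod_eq_emod_of_pos (by norm_num)
    have hpar : (decide (PySem.Int.mod (s + 1) 2 = 0)) = !(decide (PySem.Int.mod s 2 = 0)) := by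
      rw [hs, hs1]
      by_cases h : s % 2 = 0 <;> simp [h] <;> omega
    simp only [List.map_cons, List.sum_cons, ih, hpar, pvAltVal, pvVal]
    by_cases h : PySem.Int.mod s 2 = 0 <;> simp

theorem pvAsum (n : Nat) : ∀ a : Int, wpsLoopA (n : Int) a = a + pvAltVal true ((Nat.toDigits 10 n).reverse) := by
  induction n using Nat.strong_induction_on with
  | _ n ih =>
    intro a
    rcases Nat.eq_zero_or_pos n with h0 | hpos
    · subst h0
      rw [wpsLoopA]
      simp [Nat.toDigits_zero, pvAltVal]
      decide
    · rw [wpsLoopA]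
      have hlt : (0 : Int) < (n : Int) := by exact_mod_cast hpos
      have hm : PySem.Int.mod (n : Int) 10 = ((n % 10 : Nat) : Int) := by
        rw [PySem.Int.mod_eq_emod_of_pos (by norm_num)]; push_cast; rfl
      have hd : PySem.Int.floordiv (n : Int) 10 = ((n / 10 : Nat) : Int) := by
        rw [PySem.Int.floordiv_eq_ediv_of_pos (by norm_num)]; push_cast; rfl
      have hm2 : PySem.Int.mod ((n / 10 : Nat) : Int) 10 = ((n / 10 % 10 : Nat) : Int) := by
        rw [PySem.Int.mod_eq_emod_of_pos (by norm_num)]; push_cast; rfl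
      have hd2 : PySem.Int.floordiv ((n / 10 : Nat) : Int) 10 = ((n / 10 / 10 : Nat) : Int) := by
        rw [PySem.Int.floordiv_eq_ediv_of_pos (by norm_num)]; push_cast; rfl
      simp only [dif_pos hlt, hm, hd, hm2, hd2]
      by_cases h10 : n < 10
      · -- one digit: n % 10 = n, n / 10 = 0
        have e1 : n % 10 = n := Nat.mod_eq_of_lt h10
        have e2 : n / 10 = 0 := Nat.div_eq_of_lt h10
        rw [Nat.toDigits_of_lt_base h10]
        rw [e1, e2]
        simp only [Nat.zero_div, Nat.zero_mod, Nat.cast_zero]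
        rw [wpsLoopA]
        simp [pvAltVal, pvVal_digitChar n h10]
        ring
      · push Not at h10
        rw [Nat.toDigits_of_base_le (by norm_num) h10, List.reverse_append]
        simp only [List.reverse_cons, List.reverse_nil, List.nil_append, List.singleton_append]
        by_cases h100 : n / 10 < 10
        · -- two digits: n / 10 / 10 = 0
          have e2 : n / 10 % 10 = n / 10 := Nat.mod_eq_of_lt h100
          have e3 : n / 10 / 10 = 0 := Nat.div_eq_of_lt h100
          rw [Nat.toDigits_of_lt_base h100]
          rw [e2, e3]
          simp only [Nat.cast_zero]
          rw [wpsLoopA]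
          simp [pvAltVal, pvVal_digitChar _ (Nat.mod_lt n (by norm_num)), pvVal_digitChar _ h100]
          ring
        · push Not at h100
          rw [Nat.toDigits_of_base_le (by norm_num) h100, List.reverse_append]
          simp only [List.reverse_cons, List.reverse_nil, List.nil_append, List.singleton_append]
          rw [ih (n / 10 / 10) (by
            have : n / 10 < n := Nat.div_lt_self hpos (by norm_num)
            exact lt_of_le_of_lt (Nat.div_le_self _ _) this)]
          simp [pvAltVal, pvVal_digitChar _ (Nat.mod_lt n (by norm_num)),
            pvVal_digitChar _ (Nat.mod_lt (n / 10) (by norm_num))]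
          ring

-- ===== VERDICT (by name: the statement is the Claim_ definition above) =====
theorem wps_pin_checksum_spec : Claim_equal_wps_pin_checksum := by
  intro pin _ hpre
  unfold Spec_wps_pin_checksum wps_pin_checksum wps_pin_checksum_alt
  have hchars : PySem.Int.toChars pin = Nat.toDigits 10 pin.toNat := by
    have h0 : (0:Int) ≤ pin := hpre
    unfold PySem.Int.toChars
    rw [if_neg (by omega)]
  rw [hchars, PySem.List.foldl_add, pvBsum]
  have hpin : ((pin.toNat : Nat) : Int) = pin := Int.toNat_of_nonneg hpre
  have hA := pvAsum pin.toNat 0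
  rw [hpin] at hA
  rw [hA]
  norm_num
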